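-- pv_equiv track=rewrite | github.com/Athelbiban/learner | stepik_at/at_3.6.py | infinite_sequence
-- ===== SOURCE A (Python) =====
-- def infinite_sequence(n):
--     counter = 0
--     for i in range(1, n + 1):
--         k = 0
--         while counter < n and k < i:
--             counter += 1
--             k += 1
--             yield i
-- ===== SOURCE B (Python) =====
-- def infinite_sequence(n):
--     for p in range(1, n + 1):
--         lo, hi = 1, p
--         while lo < hi:
--             mid = (lo + hi) // 2
--             if mid * (mid + 1) // 2 >= p:
--                 hi = mid
--             else:
--                 lo = mid + 1
--         yield lo
-- ===== Notes on version B (the rewrite author's own statement) =====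
-- stated objective: alternative
-- what changed: Replaces A's stateful nested yield loops (outer index with a counter-capped inner repetition) by a single pass that maps each position p directly to its value, the least k whose triangular number reaches p, found by binary search.
import Mathlib
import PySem

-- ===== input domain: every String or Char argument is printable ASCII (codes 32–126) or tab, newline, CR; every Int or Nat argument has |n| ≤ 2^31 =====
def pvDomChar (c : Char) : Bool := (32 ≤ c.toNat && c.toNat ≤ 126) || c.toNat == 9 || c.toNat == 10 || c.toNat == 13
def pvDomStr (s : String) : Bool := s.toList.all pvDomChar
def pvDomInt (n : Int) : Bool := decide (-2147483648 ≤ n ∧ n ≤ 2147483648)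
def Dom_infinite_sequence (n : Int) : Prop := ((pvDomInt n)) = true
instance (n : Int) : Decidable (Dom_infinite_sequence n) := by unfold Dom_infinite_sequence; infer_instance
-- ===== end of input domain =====

-- B replaces A's stateful nested yield loops by a per-position binary search for the least
-- k whose triangular number reaches p; a different algorithm of similar cost, same list.

-- ===== PORT A =====
-- inner 'while counter < n and k < i: counter += 1; k += 1; yield i' — returns (counter, yielded)
def pvInnerA (n i counter k : Int) : Int × List Int :=
  if h : counter < n ∧ k < i then
    let r := pvInnerA n i (counter + 1) (k + 1)
    (r.1, i :: r.2)
  else (counter, [])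
termination_by (i - k).toNat
decreasing_by omega

def infinite_sequence (n : Int) : List Int :=
  ((PySem.List.pyRange 1 (n + 1) 1).foldl
    (fun (st : Int × List Int) i =>
      let r := pvInnerA n i st.1 0
      (r.1, st.2 ++ r.2))
    (0, [])).2

-- ===== PORT B =====
-- B's inner loop: halve [lo,hi] on a triangular-number test until lo = hi
def pvBsearch (p lo hi : Int) : Int :=
  if h : lo < hi then
    let mid := PySem.Int.floordiv (lo + hi) 2
    if p ≤ PySem.Int.floordiv (mid * (mid + 1)) 2 then pvBsearch p lo mid
    else pvBsearch p (mid + 1) hi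
  else lo
termination_by (hi - lo).toNat
decreasing_by
  all_goals
    have := PySem.Int.floordiv_two_mid_bounds (le_of_lt h)
    have h2 : PySem.Int.floordiv (lo + hi) 2 = (lo + hi) / 2 :=
      PySem.Int.floordiv_eq_ediv_of_pos (by omega)
    omega

def infinite_sequence_alt (n : Int) : List Int :=
  (PySem.List.pyRange 1 (n + 1) 1).map (fun p => pvBsearch p 1 p)

-- ===== PRECONDITION & SPEC =====
def Spec_infinite_sequence (n : Int) (out : List Int) : Prop := out = infinite_sequence_alt n
instance (n : Int) (out : List Int) : Decidable (Spec_infinite_sequence n out) := by unfold Spec_infinite_sequence; infer_instance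

-- ===== CLAIM (what is proved, stated in full; the proofs are below) =====
def Claim_equal_infinite_sequence : Prop := ∀ (n : Int), Dom_infinite_sequence n → Spec_infinite_sequence n (infinite_sequence n)

-- ===== LEMMAS AND PROOFS =====

-- the triangular number i*(i+1)//2, as B computes it
def pvTri (i : Int) : Int := PySem.Int.floordiv (i * (i + 1)) 2

theorem pvTri_eq_ediv (i : Int) : pvTri i = i * (i + 1) / 2 :=
  PySem.Int.floordiv_eq_ediv_of_pos (by omega)

theorem pvTri_step (a : Int) : pvTri a = pvTri (a - 1) + a := by
  obtain ⟨j, hj⟩ : ∃ j, (a - 1) * a = j + j := by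
    rcases Int.even_mul_succ_self (a - 1) with ⟨j, hj⟩
    exact ⟨j, by linarith [hj]⟩
  have h1 : a * (a + 1) = (a - 1) * a + 2 * a := by ring
  have h2 : (a - 1) * (a - 1 + 1) = (a - 1) * a := by ring
  rw [pvTri_eq_ediv, pvTri_eq_ediv, h2]
  omega

theorem pvTri_zero : pvTri 0 = 0 := by decide

theorem pvTri_mono {m1 m2 : Int} (h0 : 0 ≤ m1) (h : m1 ≤ m2) : pvTri m1 ≤ pvTri m2 := by
  have hk : ∃ k : Nat, m2 = m1 + k := ⟨(m2 - m1).toNat, by omega⟩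
  obtain ⟨k, rfl⟩ := hk
  clear h
  induction k with
  | zero => simp
  | succ k ih =>
    have hs := pvTri_step (m1 + (k + 1 : Nat))
    have : m1 + (k + 1 : Nat) - 1 = m1 + k := by push_cast; ring
    rw [this] at hs
    omega

theorem pvTri_ge_self {m : Int} (h : 0 ≤ m) : m ≤ pvTri m := by
  have h1 : 2 * m ≤ m * (m + 1) := by
    rcases eq_or_lt_of_le h with rfl | hm
    · norm_num
    · nlinarith
  have h2 : ∃ j, m * (m + 1) = j + j := by
    rcases Int.even_mul_succ_self m with ⟨j, hj⟩
    exact ⟨j, by linarith [hj]⟩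
  obtain ⟨j, hj⟩ := h2
  rw [pvTri_eq_ediv]
  omega

theorem pvTri_nonneg {m : Int} (h : 0 ≤ m) : 0 ≤ pvTri m :=
  le_trans h (pvTri_ge_self h)

-- A's inner while loop yields min(n-counter, i-k) (clamped at 0) copies of i
theorem pvInnerA_spec_fuel (n i : Int) : ∀ (fuel : Nat) (k counter : Int), (i - k).toNat ≤ fuel →
    pvInnerA n i counter k =
      (counter + max (min (n - counter) (i - k)) 0,
       List.replicate (max (min (n - counter) (i - k)) 0).toNat i) := by
  intro fuel
  induction fuel with
  | zero =>
    intro k counter hf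
    rw [pvInnerA]
    have hik : i - k ≤ 0 := by omega
    rw [dif_neg (by omega)]
    have hm : max (min (n - counter) (i - k)) 0 = 0 := by omega
    simp [hm]
  | succ fuel ih =>
    intro k counter hf
    rw [pvInnerA]
    by_cases h : counter < n ∧ k < i
    · rw [dif_pos h]
      rw [ih (k + 1) (counter + 1) (by omega)]
      have hm : max (min (n - counter) (i - k)) 0
          = max (min (n - (counter + 1)) (i - (k + 1))) 0 + 1 := by omega
      have hmt : (max (min (n - (counter + 1)) (i - (k + 1))) 0 + 1).toNat
          = (max (min (n - (counter + 1)) (i - (k + 1))) 0).toNat + 1 := by omega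
      simp only [hm, hmt, List.replicate_succ, Prod.mk.injEq]
      exact ⟨by omega, trivial⟩
    · rw [dif_neg h]
      have hm : max (min (n - counter) (i - k)) 0 = 0 := by omega
      simp [hm]

theorem pvInnerA_spec (n i : Int) : ∀ k counter : Int,
    pvInnerA n i counter k =
      (counter + max (min (n - counter) (i - k)) 0,
       List.replicate (max (min (n - counter) (i - k)) 0).toNat i) :=
  fun k counter => pvInnerA_spec_fuel n i (i - k).toNat k counter le_rfl

-- binary search finds the unique a with tri(a-1) < p ≤ tri a inside [lo, hi]
theorem pvBsearch_correct : ∀ (fuel : Nat) (p lo hi a : Int), (hi - lo).toNat ≤ fuel →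
    0 ≤ lo → lo ≤ a → a ≤ hi → pvTri (a - 1) < p → p ≤ pvTri a →
    pvBsearch p lo hi = a := by
  intro fuel
  induction fuel with
  | zero =>
    intro p lo hi a hf h0 hla hah _ _
    rw [pvBsearch, dif_neg (by omega)]
    omega
  | succ fuel ih =>
    intro p lo hi a hf h0 hla hah h1 h2
    rw [pvBsearch]
    by_cases h : lo < hi
    · rw [dif_pos h]
      have hmid := PySem.Int.floordiv_two_mid_bounds (le_of_lt h)
      have hme : PySem.Int.floordiv (lo + hi) 2 = (lo + hi) / 2 :=
        PySem.Int.floordiv_eq_ediv_of_pos (by omega)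
      set mid := PySem.Int.floordiv (lo + hi) 2 with hmiddef
      show (if p ≤ pvTri mid then pvBsearch p lo mid else pvBsearch p (mid + 1) hi) = a
      by_cases hb : p ≤ pvTri mid
      · rw [if_pos hb]
        have hamid : a ≤ mid := by
          by_contra hc
          have : pvTri mid ≤ pvTri (a - 1) := pvTri_mono (by omega) (by omega)
          omega
        exact ih p lo mid a (by omega) h0 hla hamid h1 h2
      · rw [if_neg hb]
        have hamid : mid + 1 ≤ a := by
          by_contra hc
          have : pvTri a ≤ pvTri mid := pvTri_mono (by omega) (by omega)
          omega
        exact ih p (mid + 1) hi a (by omega) (by omega) hamid hah h1 h2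
    · rw [dif_neg h]
      omega

theorem pvB_val (p a : Int) (ha : 1 ≤ a) (h1 : pvTri (a - 1) < p) (h2 : p ≤ pvTri a) :
    pvBsearch p 1 p = a := by
  have hp : a ≤ p := by
    have := pvTri_ge_self (m := a - 1) (by omega)
    omega
  exact pvBsearch_correct (p - 1).toNat p 1 p a (by omega) (by omega) ha hp h1 h2

-- a constant stretch of B's map is a replicate
theorem pvMap_const : ∀ (fuel : Nat) (lo hi a : Int), (hi - lo).toNat ≤ fuel →
    (∀ p, lo ≤ p → p < hi → pvBsearch p 1 p = a) →
    (PySem.List.pyRange lo hi 1).map (fun p => pvBsearch p 1 p) =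
      List.replicate (hi - lo).toNat a := by
  intro fuel
  induction fuel with
  | zero =>
    intro lo hi a hf _
    rw [PySem.List.pyRange_one_eq_nil (by omega)]
    have : (hi - lo).toNat = 0 := by omega
    simp [this]
  | succ fuel ih =>
    intro lo hi a hf hall
    by_cases h : lo < hi
    · rw [PySem.List.pyRange_one_cons h, List.map_cons,
        hall lo le_rfl h,
        ih (lo + 1) hi a (by omega) (fun p hp1 hp2 => hall p (by omega) hp2)]
      have : (hi - lo).toNat = (hi - (lo + 1)).toNat + 1 := by omega
      rw [this, List.replicate_succ]
    · rw [PySem.List.pyRange_one_eq_nil (by omega)]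
      have : (hi - lo).toNat = 0 := by omega
      simp [this]

-- outer fold invariant: counter = min n (tri (a-1)), acc = B's answers for positions 1..counter
theorem pvOuter : ∀ (fuel : Nat) (n a c : Int) (acc : List Int), (n + 1 - a).toNat ≤ fuel →
    1 ≤ a → 1 ≤ n → c = min n (pvTri (a - 1)) →
    acc = (PySem.List.pyRange 1 (c + 1) 1).map (fun p => pvBsearch p 1 p) →
    ((PySem.List.pyRange a (n + 1) 1).foldl
      (fun (st : Int × List Int) i =>
        let r := pvInnerA n i st.1 0
        (r.1, st.2 ++ r.2)) (c, acc)).2 =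
      (PySem.List.pyRange 1 (n + 1) 1).map (fun p => pvBsearch p 1 p) := by
  intro fuel
  induction fuel with
  | zero =>
    intro n a c acc hf ha hn hc hacc
    rw [PySem.List.pyRange_one_eq_nil (by omega)]
    have h0 : 0 ≤ pvTri n := pvTri_nonneg (by omega)
    have h1 : pvTri n ≤ pvTri (a - 1) := pvTri_mono (by omega) (by omega)
    have h2 : n ≤ pvTri n := pvTri_ge_self (by omega)
    have hcn : c = n := by omega
    simp only [List.foldl_nil]
    rw [hacc, hcn]
  | succ fuel ih =>
    intro n a c acc hf ha hn hc hacc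
    by_cases h : a < n + 1
    · rw [PySem.List.pyRange_one_cons h, List.foldl_cons]
      have hstep := pvInnerA_spec n a 0 c
      have ht := pvTri_step a
      have h0 : 0 ≤ pvTri (a - 1) := pvTri_nonneg (by omega)
      set m := max (min (n - c) (a - 0)) 0 with hmdef
      have hc0 : 0 ≤ c := by omega
      have hrec := ih n (a + 1) (c + m) (acc ++ List.replicate m.toNat a) (by omega)
        (by omega) hn
        (by rw [show a + 1 - 1 = a by ring]; omega)
        (by
          rw [PySem.List.pyRange_one_append 1 (c + 1) (c + m + 1) (by omega) (by omega),
            List.map_append, ← hacc,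
            pvMap_const m.toNat (c + 1) (c + m + 1) a (by omega)
              (fun p hp1 hp2 => by
                have hm1 : 1 ≤ m := by omega
                have hcn : c = pvTri (a - 1) := by omega
                exact pvB_val p a ha (by omega) (by omega))]
          have : (c + m + 1 - (c + 1)).toNat = m.toNat := by omega
          rw [this])
      simpa [hstep] using hrec
    · rw [PySem.List.pyRange_one_eq_nil (by omega)]
      have h0 : 0 ≤ pvTri n := pvTri_nonneg (by omega)
      have h1 : pvTri n ≤ pvTri (a - 1) := pvTri_mono (by omega) (by omega)
      have h2 : n ≤ pvTri n := pvTri_ge_self (by omega)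
      have hcn : c = n := by omega
      simp only [List.foldl_nil]
      rw [hacc, hcn]

-- ===== VERDICT (by name: the statement is the Claim_ definition above) =====
theorem infinite_sequence_spec : Claim_equal_infinite_sequence := by
  intro n _
  unfold Spec_infinite_sequence infinite_sequence infinite_sequence_alt
  by_cases hn : n ≤ 0
  · rw [PySem.List.pyRange_one_eq_nil (by omega)]
    simp
  · exact pvOuter (n.toNat) n 1 0 [] (by omega) le_rfl (by omega)
      (by rw [show (1:Int) - 1 = 0 by norm_num, pvTri_zero]; omega)
      (by rw [PySem.List.pyRange_one_eq_nil (by omega)]; simp)
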